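-- pv_equiv track=rewrite | github.com/Borna2803/job | task_1/delivery.py | best_option
-- ===== SOURCE A (Python) =====
-- def best_option(delivery_services: list) -> dict:
--     min = delivery_services[0]['price']
--     tmp = delivery_services[0]
--     for delivery_service in delivery_services:
--         if delivery_service['price'] < min:
--             min = delivery_service['price']
--             tmp = delivery_service
--     return tmp
-- ===== SOURCE B (Python) =====
-- def best_option(delivery_services: list) -> dict:
--     # Stable sort by price; the first element of the sorted list is the
--     # first-in-original-order service with the minimal price (ties: first wins,
--     # matching A's strict-< scan). Raises IndexError on [] like A.
--     return sorted(delivery_services, key=lambda d: d['price'])[0]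
-- ===== Notes on version B (the rewrite author's own statement) =====
-- stated objective: alternative
-- what changed: Replaces the running-minimum scan with a stable sort by price followed by taking the first element; stability preserves A's first-wins tie-breaking.
import Mathlib
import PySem

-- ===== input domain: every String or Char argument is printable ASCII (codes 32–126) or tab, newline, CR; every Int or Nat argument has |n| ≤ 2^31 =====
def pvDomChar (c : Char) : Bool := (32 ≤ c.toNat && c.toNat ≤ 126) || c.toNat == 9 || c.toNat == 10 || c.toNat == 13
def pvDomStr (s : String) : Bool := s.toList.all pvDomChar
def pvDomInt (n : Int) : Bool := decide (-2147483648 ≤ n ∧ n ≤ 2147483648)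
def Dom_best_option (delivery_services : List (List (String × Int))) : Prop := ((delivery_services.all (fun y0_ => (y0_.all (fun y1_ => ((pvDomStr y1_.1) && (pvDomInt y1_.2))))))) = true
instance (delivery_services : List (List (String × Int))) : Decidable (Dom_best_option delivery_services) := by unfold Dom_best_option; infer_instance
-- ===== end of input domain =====

-- B replaces A's running-minimum scan with a stable sort by price + first element
-- (same first-wins tie-breaking); equivalence proved on nonempty inputs whose dicts all carry 'price'.

-- ===== PORT A =====
-- d['price']: exact whenever the key is present (guaranteed by Pre_); .getD 0 is never reached inside Pre_.
def pvPrice (d : List (String × Int)) : Int := ((PySem.Dict.mk d).get? "price").getD 0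

def best_option (delivery_services : List (List (String × Int))) : List (String × Int) :=
  -- min = delivery_services[0]['price']; tmp = delivery_services[0]  (d[0] exact inside Pre_: list nonempty)
  let first := (PySem.List.pyGet? delivery_services 0).getD []
  let init : Int × List (String × Int) := (pvPrice first, first)
  -- for delivery_service in delivery_services: if price < min: update both
  (delivery_services.foldl
    (fun st d => if pvPrice d < st.1 then (pvPrice d, d) else st) init).2

-- ===== PORT B =====
def best_option_alt (delivery_services : List (List (String × Int))) : List (String × Int) :=
  -- sorted(delivery_services, key=lambda d: d['price'])[0]  ([0] exact inside Pre_: list nonempty)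
  (PySem.List.pyGet? (PySem.List.sorted delivery_services pvPrice false) 0).getD []

-- ===== PRECONDITION & SPEC =====
-- Exactly where the Python A returns: a nonempty list (else IndexError) all of whose
-- dicts contain the key "price" (else KeyError during the scan).
def Pre_best_option (delivery_services : List (List (String × Int))) : Prop :=
  delivery_services ≠ [] ∧
  ∀ d ∈ delivery_services, ((PySem.Dict.mk d).get? "price").isSome = true
instance (delivery_services : List (List (String × Int))) : Decidable (Pre_best_option delivery_services) := by unfold Pre_best_option; infer_instance

def pvWitness_best_option : (List (List (String × Int))) :=
  [[("price", 5), ("name", 1)], [("price", 3)], [("price", 3), ("speed", 2)]]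

def Spec_best_option (delivery_services : List (List (String × Int))) (out : List (String × Int)) : Prop := out = best_option_alt delivery_services
instance (delivery_services : List (List (String × Int))) (out : List (String × Int)) : Decidable (Spec_best_option delivery_services out) := by unfold Spec_best_option; infer_instance

-- ===== CLAIM (what is proved, stated in full; the proofs are below) =====
def Claim_equal_best_option : Prop := ∀ (delivery_services : List (List (String × Int))), Dom_best_option delivery_services → Pre_best_option delivery_services → Spec_best_option delivery_services (best_option delivery_services)

-- ===== LEMMAS AND PROOFS =====

-- the common "first element of minimal price" scan both sides reduce to
def pvScan (l : List (List (String × Int))) (t : List (String × Int)) : List (String × Int) :=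
  l.foldl (fun t d => if pvPrice d < pvPrice t then d else t) t

lemma pvA_fold_eq_scan (l : List (List (String × Int))) (t : List (String × Int)) :
    l.foldl (fun st d => if pvPrice d < st.1 then (pvPrice d, d) else st) (pvPrice t, t)
      = (pvPrice (pvScan l t), pvScan l t) := by
  induction l generalizing t with
  | nil => rfl
  | cons x xs ih =>
      simp only [List.foldl_cons, pvScan]
      by_cases h : pvPrice x < pvPrice t
      · simp only [h, if_pos h]
        exact ih x
      · simp only [h, if_neg h]
        exact ih t

def pvIns (acc : List (List (String × Int))) (x : List (String × Int)) : List (List (String × Int)) :=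
  PySem.List.insertBy (fun a b => decide (pvPrice a < pvPrice b)) x acc

lemma pvIns_head (x h : List (String × Int)) (t : List (List (String × Int))) :
    ∃ t', pvIns (h :: t) x = (if pvPrice x < pvPrice h then x else h) :: t' := by
  by_cases hx : pvPrice x < pvPrice h
  · exact ⟨h :: t, by simp [pvIns, PySem.List.insertBy, hx]⟩
  · exact ⟨PySem.List.insertBy (fun a b => decide (pvPrice a < pvPrice b)) x t,
      by simp [pvIns, PySem.List.insertBy, hx]⟩

lemma pvFold_ins_head (l : List (List (String × Int))) (h : List (String × Int))
    (t : List (List (String × Int))) :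
    ∃ t', l.foldl pvIns (h :: t) = pvScan l h :: t' := by
  induction l generalizing h t with
  | nil => exact ⟨t, rfl⟩
  | cons x xs ih =>
      obtain ⟨t', ht'⟩ := pvIns_head x h t
      simp only [List.foldl_cons, ht', pvScan, List.foldl_cons]
      by_cases hx : pvPrice x < pvPrice h
      · simp only [hx, if_pos hx] at ht' ⊢
        exact ih x t'
      · simp only [hx, if_neg hx] at ht' ⊢
        exact ih h t'

lemma sorted_head_eq_scan (x : List (String × Int)) (xs : List (List (String × Int))) :
    ∃ t', PySem.List.sorted (x :: xs) pvPrice false = pvScan xs x :: t' := by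
  rw [PySem.List.sorted_eq_foldl_insertBy]
  show ∃ t', xs.foldl pvIns (pvIns [] x) = pvScan xs x :: t'
  have : pvIns [] x = [x] := rfl
  rw [this]
  exact pvFold_ins_head xs x []

-- ===== VERDICT (by name: the statement is the Claim_ definition above) =====
theorem best_option_spec : Claim_equal_best_option := by
  intro ds _ hpre
  obtain ⟨hne, -⟩ := hpre
  obtain ⟨x, xs, rfl⟩ := List.exists_cons_of_ne_nil hne
  show best_option (x :: xs) = best_option_alt (x :: xs)
  obtain ⟨t', ht'⟩ := sorted_head_eq_scan x xs
  have hfirst : ∀ (y : List (String × Int)) (ys : List (List (String × Int))),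
      (PySem.List.pyGet? (y :: ys) 0).getD [] = y := by
    intro y ys
    simp [PySem.List.pyGet?, PySem.List.pyIdx?]
  simp only [best_option, best_option_alt, ht', hfirst]
  rw [List.foldl_cons]
  simp only [ite_self]
  rw [pvA_fold_eq_scan xs x]
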